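-- pv_equiv track=rewrite | github.com/ceezign/python-daily-challenge | day17.py | reconstruct_dfs
-- ===== SOURCE A (Python) =====
-- def reconstruct_dfs(s, words):
--     word_set = set(words)
--     memo = {}               # start index -> None or list or words from start_index
--
--     def helper(i):
--         if i == len(s):
--             return []
--         if i in memo:
--             return memo[i]
--         for j in range(i+1, len(s)+1):
--             w = s[i:j]
--             if w in word_set:
--                 rest = helper(j)
--                 if rest is not None:
--                     memo[i] = [w] + rest
--                     return memo[i]
--         memo[i] = None
--         return None
--     return helper(0)
-- ===== SOURCE B (Python) =====
-- def reconstruct_dfs(s, words):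
--     word_set = set(words)
--     n = len(s)
--     dp = [None] * (n + 1)
--     dp[n] = []
--     for i in range(n - 1, -1, -1):
--         for j in range(i + 1, n + 1):
--             w = s[i:j]
--             if w in word_set and dp[j] is not None:
--                 dp[i] = [w] + dp[j]
--                 break
--     return dp[0]
-- ===== Notes on version B (the rewrite author's own statement) =====
-- stated objective: simpler
-- what changed: Replaces the memoized recursive DFS with an inner helper and a memo dict by an explicit bottom-up DP array filled right-to-left; the same first-found segmentation is read off dp[0].
import Mathlib
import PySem

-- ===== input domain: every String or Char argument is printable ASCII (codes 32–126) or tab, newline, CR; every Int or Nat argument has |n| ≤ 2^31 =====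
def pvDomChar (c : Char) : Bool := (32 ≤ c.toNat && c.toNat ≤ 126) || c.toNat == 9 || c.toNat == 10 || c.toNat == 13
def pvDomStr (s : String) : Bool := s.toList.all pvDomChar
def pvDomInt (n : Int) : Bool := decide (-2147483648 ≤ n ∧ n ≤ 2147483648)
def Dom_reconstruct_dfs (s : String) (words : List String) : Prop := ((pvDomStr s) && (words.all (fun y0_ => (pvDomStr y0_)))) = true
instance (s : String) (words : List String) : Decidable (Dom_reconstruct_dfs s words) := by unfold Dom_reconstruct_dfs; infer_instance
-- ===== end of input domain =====

-- B replaces A's memoized recursive DFS (inner helper + memo dict) by an explicit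
-- bottom-up DP table filled right-to-left; same first-found segmentation, read from dp[0].

-- ===== PORT A =====
-- s[i:j] with 0 ≤ i ≤ j is ported exactly as (cs.drop i).take (j - i) (no negative/clamped
-- bounds arise: i, j come from range(i+1, len(s)+1)); range(i+1, len(s)+1) is List.range' (i+1) (n-i).
-- The loop 'for j in range(...)' with early return is pvLoopA; the memoized helper is pvHelperA,
-- made total with a fuel argument (fuel n+1 suffices: helper(i) only calls helper(j) for j > i).
def pvLoopA (cs : List Char) (ws : PySem.Set String)
    (h : Nat → PySem.Dict Nat (Option (List String)) → Option (List String) × PySem.Dict Nat (Option (List String))) :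
    List Nat → Nat → PySem.Dict Nat (Option (List String)) →
    Option (List String) × PySem.Dict Nat (Option (List String))
  | [], i, memo => (none, memo.insert i none)
  | j :: js, i, memo =>
    let w := String.ofList ((cs.drop i).take (j - i))
    if PySem.Set.contains ws w then
      match h j memo with
      | (some rest, memo') => (some (w :: rest), memo'.insert i (some (w :: rest)))
      | (none, memo') => pvLoopA cs ws h js i memo'
    else pvLoopA cs ws h js i memo

def pvHelperA (cs : List Char) (ws : PySem.Set String) :
    Nat → Nat → PySem.Dict Nat (Option (List String)) →
    Option (List String) × PySem.Dict Nat (Option (List String))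
  | 0, _, memo => (none, memo)   -- fuel exhausted; unreachable for the fuel used below
  | fuel + 1, i, memo =>
    if i = cs.length then (some [], memo)
    else match memo.get? i with
      | some v => (v, memo)
      | none => pvLoopA cs ws (pvHelperA cs ws fuel) (List.range' (i + 1) (cs.length - i)) i memo

def reconstruct_dfs (s : String) (words : List String) : Option (List String) :=
  let cs := s.toList
  (pvHelperA cs (PySem.Set.ofList words) (cs.length + 1) 0 PySem.Dict.empty).1

-- ===== PORT B =====
-- dp is kept as a list whose head is the entry for the smallest index computed so far:
-- pvBuildB k = [dp[n-k], …, dp[n]].  pvScanB is B's inner 'for j' loop with break.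
def pvScanB (cs : List Char) (ws : PySem.Set String) (i : Nat) :
    Nat → List (Option (List String)) → Option (List String)
  | _, [] => none
  | j, d :: ds =>
    let w := String.ofList ((cs.drop i).take (j - i))
    if PySem.Set.contains ws w then
      match d with
      | some rest => some (w :: rest)
      | none => pvScanB cs ws i (j + 1) ds
    else pvScanB cs ws i (j + 1) ds

def pvBuildB (cs : List Char) (ws : PySem.Set String) : Nat → List (Option (List String))
  | 0 => [some []]
  | k + 1 =>
    let dp := pvBuildB cs ws k
    let i := cs.length - (k + 1)
    pvScanB cs ws i (i + 1) dp :: dp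

def reconstruct_dfs_alt (s : String) (words : List String) : Option (List String) :=
  let cs := s.toList
  (pvBuildB cs (PySem.Set.ofList words) cs.length).headD none

-- ===== PRECONDITION & SPEC =====
def Spec_reconstruct_dfs (s : String) (words : List String) (out : Option (List String)) : Prop := out = reconstruct_dfs_alt s words
instance (s : String) (words : List String) (out : Option (List String)) : Decidable (Spec_reconstruct_dfs s words out) := by unfold Spec_reconstruct_dfs; infer_instance

-- ===== CLAIM (what is proved, stated in full; the proofs are below) =====
def Claim_equal_reconstruct_dfs : Prop := ∀ (s : String) (words : List String), Dom_reconstruct_dfs s words → Spec_reconstruct_dfs s words (reconstruct_dfs s words)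

-- ===== LEMMAS AND PROOFS =====

-- Canonical table entry: dp[i], read from B's table.
def pvF (cs : List Char) (ws : PySem.Set String) (i : Nat) : Option (List String) :=
  (pvBuildB cs ws (cs.length - i)).headD none

-- First-fit scan against the canonical table: shared shape of A's j-loop and B's j-loop.
def pvFirst (cs : List Char) (ws : PySem.Set String) (i : Nat) : List Nat → Option (List String)
  | [] => none
  | j :: js =>
    let w := String.ofList ((cs.drop i).take (j - i))
    if PySem.Set.contains ws w then
      match pvF cs ws j with
      | some rest => some (w :: rest)
      | none => pvFirst cs ws i js
    else pvFirst cs ws i js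

lemma pvBuildB_length (cs : List Char) (ws : PySem.Set String) (k : Nat) :
    (pvBuildB cs ws k).length = k + 1 := by
  induction k with
  | zero => rfl
  | succ k ih => simp [pvBuildB, ih]

lemma pvBuildB_get? (cs : List Char) (ws : PySem.Set String) (k m : Nat) (hm : m ≤ k) :
    (pvBuildB cs ws k)[m]? = some ((pvBuildB cs ws (k - m)).headD none) := by
  induction k generalizing m with
  | zero => interval_cases m <;> rfl
  | succ k ih =>
    cases m with
    | zero =>
      simp [pvBuildB]
    | succ m =>
      have h' : m ≤ k := by omega
      simpa [pvBuildB, Nat.succ_sub_succ] using ih m h'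

lemma pvScanB_eq_first (cs : List Char) (ws : PySem.Set String) (i : Nat) :
    ∀ (dp : List (Option (List String))) (j : Nat),
      (∀ m, m < dp.length → dp[m]? = some (pvF cs ws (j + m))) →
      pvScanB cs ws i j dp = pvFirst cs ws i (List.range' j dp.length) := by
  intro dp
  induction dp with
  | nil => intro j _; exact rfl
  | cons d ds ih =>
    intro j hdp
    have hd : d = pvF cs ws j := by
      have := hdp 0 (by simp)
      simpa using this
    have hds : ∀ m, m < ds.length → ds[m]? = some (pvF cs ws (j + 1 + m)) := by
      intro m hm
      have := hdp (m + 1) (by simpa using Nat.succ_lt_succ hm)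
      simpa [Nat.add_assoc, Nat.add_comm 1 m] using this
    simp only [List.length_cons, List.range'_succ, pvScanB, pvFirst, ← hd]
    cases d with
    | none =>
      split_ifs
      · simpa using ih (j + 1) hds
      · simpa using ih (j + 1) hds
    | some rest =>
      split_ifs
      · simp [ih (j + 1) hds]
      · simp [ih (j + 1) hds]

lemma pvF_base (cs : List Char) (ws : PySem.Set String) : pvF cs ws cs.length = some [] := by
  simp [pvF, pvBuildB]

lemma pvF_step (cs : List Char) (ws : PySem.Set String) (i : Nat) (hi : i < cs.length) :
    pvF cs ws i = pvFirst cs ws i (List.range' (i + 1) (cs.length - i)) := by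
  have hk : cs.length - i = (cs.length - i - 1) + 1 := by omega
  have hi' : cs.length - ((cs.length - i - 1) + 1) = i := by omega
  have hlen : (pvBuildB cs ws (cs.length - i - 1)).length = cs.length - i := by
    rw [pvBuildB_length]; omega
  have hscan := pvScanB_eq_first cs ws i (pvBuildB cs ws (cs.length - i - 1)) (i + 1)
    (by
      intro m hm
      rw [hlen] at hm
      rw [pvBuildB_get? cs ws _ m (by omega)]
      have : cs.length - i - 1 - m = cs.length - (i + 1 + m) := by omega
      rw [this]
      rfl)
  rw [pvF, hk]
  simp only [pvBuildB, hi', List.headD_cons]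
  rw [hscan, hlen, ← hk]

-- the memo invariant: every stored entry is the canonical table value
def pvInv (cs : List Char) (ws : PySem.Set String)
    (memo : PySem.Dict Nat (Option (List String))) : Prop :=
  ∀ k v, memo.get? k = some v → v = pvF cs ws k

lemma pvInv_insert (cs : List Char) (ws : PySem.Set String)
    (memo : PySem.Dict Nat (Option (List String))) (i : Nat) (v : Option (List String))
    (h : pvInv cs ws memo) (hv : v = pvF cs ws i) : pvInv cs ws (memo.insert i v) := by
  intro k u hu
  rw [PySem.Dict.get?_insert] at hu
  split_ifs at hu with hk
  · cases hu; rw [hv, hk]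
  · exact h k u hu

lemma pvLoopA_spec (cs : List Char) (ws : PySem.Set String) (fuel : Nat)
    (IH : ∀ (i : Nat) (memo : PySem.Dict Nat (Option (List String))),
      i ≤ cs.length → cs.length - i < fuel → pvInv cs ws memo →
      (pvHelperA cs ws fuel i memo).1 = pvF cs ws i ∧ pvInv cs ws (pvHelperA cs ws fuel i memo).2) :
    ∀ (js : List Nat) (i : Nat) (memo : PySem.Dict Nat (Option (List String))),
      pvInv cs ws memo →
      (∀ j ∈ js, j ≤ cs.length ∧ cs.length - j < fuel) →
      pvF cs ws i = pvFirst cs ws i js →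
      (pvLoopA cs ws (pvHelperA cs ws fuel) js i memo).1 = pvF cs ws i ∧
        pvInv cs ws (pvLoopA cs ws (pvHelperA cs ws fuel) js i memo).2 := by
  intro js
  induction js with
  | nil =>
    intro i memo hinv _ hfirst
    refine ⟨by simpa [pvLoopA, pvFirst] using hfirst.symm, ?_⟩
    exact pvInv_insert cs ws memo i none hinv (by simpa [pvFirst] using hfirst.symm)
  | cons j js ihjs =>
    intro i memo hinv hjs hfirst
    obtain ⟨hj1, hj2⟩ := hjs j (by simp)
    obtain ⟨hres, hinv'⟩ := IH j memo hj1 hj2 hinv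
    rcases hp : pvHelperA cs ws fuel j memo with ⟨res, memo'⟩
    rw [hp] at hres hinv'
    simp only at hres hinv'
    simp only [pvLoopA, hp]
    simp only [pvFirst, ← hres] at hfirst
    by_cases hw : PySem.Set.contains ws (String.ofList ((cs.drop i).take (j - i))) = true
    · simp only [hw, if_true] at hfirst ⊢
      cases res with
      | none =>
        exact ihjs i memo' hinv' (fun x hx => hjs x (by simp [hx])) hfirst
      | some rest =>
        exact ⟨hfirst.symm, pvInv_insert cs ws memo' i _ hinv' hfirst.symm⟩
    · simp only [Bool.not_eq_true] at hw
      simp only [hw, Bool.false_eq_true, if_false] at hfirst ⊢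
      exact ihjs i memo hinv (fun x hx => hjs x (by simp [hx])) hfirst

lemma pvHelperA_spec (cs : List Char) (ws : PySem.Set String) :
    ∀ (fuel i : Nat) (memo : PySem.Dict Nat (Option (List String))),
      i ≤ cs.length → cs.length - i < fuel → pvInv cs ws memo →
      (pvHelperA cs ws fuel i memo).1 = pvF cs ws i ∧ pvInv cs ws (pvHelperA cs ws fuel i memo).2 := by
  intro fuel
  induction fuel with
  | zero => intro i memo _ h _; omega
  | succ fuel ih =>
    intro i memo hi hfuel hinv
    by_cases hin : i = cs.length
    · subst hin
      simp [pvHelperA, pvF_base, hinv]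
    · have hlt : i < cs.length := by omega
      simp only [pvHelperA, hin, if_false]
      cases hmemo : PySem.Dict.get? memo i with
      | some v =>
        exact ⟨(hinv i v hmemo).symm ▸ rfl, hinv⟩
      | none =>
        refine pvLoopA_spec cs ws fuel ih (List.range' (i + 1) (cs.length - i)) i memo hinv ?_ ?_
        · intro j hj
          rw [List.mem_range'_1] at hj
          omega
        · exact pvF_step cs ws i hlt

-- ===== VERDICT (by name: the statement is the Claim_ definition above) =====
theorem reconstruct_dfs_spec : Claim_equal_reconstruct_dfs := by
  intro s words _
  unfold Spec_reconstruct_dfs reconstruct_dfs reconstruct_dfs_alt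
  have h := pvHelperA_spec s.toList (PySem.Set.ofList words) (s.toList.length + 1) 0
      PySem.Dict.empty (by omega) (by omega) (by intro k v hv; simp [PySem.Dict.get?_empty] at hv)
  simpa [pvF] using h.1
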